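-- pv_equiv track=rewrite | github.com/Youyu-eyes/codeforces-classification | 图论/BFS/2172M. Maximum Distance To Port.py | solve
-- ===== SOURCE A (Python) =====
-- from collections import deque
--
-- def solve(n, g, types, k):
--     dist = [-1] * (n + 1)
--     dist[1] = 0
--     q = deque([1])
--
--     while q:
--         u = q.popleft()
--         for v in g[u]:
--             if dist[v] == -1:
--                 dist[v] = dist[u] + 1
--                 q.append(v)
--
--     max_dist = [-1] * (k + 1)
--     for i in range(1, n + 1):
--         t = types[i - 1]
--         max_dist[t] = max(max_dist[t], dist[i])
--
--     return max_dist[1:]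
-- ===== SOURCE B (Python) =====
-- def solve(n, g, types, k):
--     # Queue-free BFS: a round-based level sweep.  Round d scans the whole node
--     # array for nodes at level d and relaxes their edges; no deque/frontier is
--     # maintained.  Per-type maxima are folded over (type, distance) pairs.
--     dist = [-1] * (n + 1)
--     dist[1] = 0
--     for d in range(n + 1):
--         for u in range(n + 1):
--             if dist[u] == d:
--                 for v in g[u]:
--                     if dist[v] == -1:
--                         dist[v] = d + 1
--     max_dist = [-1] * (k + 1)
--     for t, du in zip(types, dist[1:]):
--         max_dist[t] = max(max_dist[t], du)
--     return max_dist[1:]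
-- ===== Notes on version B (the rewrite author's own statement) =====
-- stated objective: alternative
-- what changed: A's deque-based worklist BFS is replaced by a queue-free round-based level sweep (round d rescans the whole node array for nodes at distance d and relaxes their edges; no queue or frontier structure exists), and the per-type maxima are folded over (type, distance) pairs instead of an index loop.
-- outside the precondition, e.g. on solve(3, [[], [-1], [], [], [2]], [1, 1, 1], 1): A returns [2], B returns [1]; on solve(5, [[], [2], [3], []], [1, 1, 1, 1, 1], 1): A returns [2], B returns [2]
import Mathlib
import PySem

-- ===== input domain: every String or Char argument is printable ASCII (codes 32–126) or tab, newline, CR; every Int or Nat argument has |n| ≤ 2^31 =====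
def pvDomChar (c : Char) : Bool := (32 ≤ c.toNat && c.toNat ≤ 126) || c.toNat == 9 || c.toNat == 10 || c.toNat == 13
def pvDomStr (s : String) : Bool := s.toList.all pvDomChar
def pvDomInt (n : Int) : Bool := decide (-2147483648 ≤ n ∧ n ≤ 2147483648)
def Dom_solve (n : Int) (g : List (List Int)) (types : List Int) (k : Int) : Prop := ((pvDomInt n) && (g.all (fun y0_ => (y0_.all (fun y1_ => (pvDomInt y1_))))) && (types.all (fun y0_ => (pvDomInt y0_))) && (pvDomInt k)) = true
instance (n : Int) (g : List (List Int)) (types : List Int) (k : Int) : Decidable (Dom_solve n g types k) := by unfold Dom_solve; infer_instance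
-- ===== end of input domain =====

-- B replaces A's deque-based worklist BFS by a queue-free round-based level sweep
-- (round d rescans the whole node array for nodes at distance d and relaxes their
-- edges; no queue/frontier structure exists) and folds the per-type maxima over
-- (type, distance) pairs; an alternative decomposition, proved equal on Pre_solve.

-- ===== PORT A =====
-- inner 'for v in g[u]' body of A's BFS loop; state = (dist, queue-after-popleft)
def bodyA (u : Int) (p : List Int × List Int) (v : Int) : List Int × List Int :=
  if PySem.List.pyGetD p.1 v (-1) = -1 then
    (PySem.List.pySetD p.1 v (PySem.List.pyGetD p.1 u (-1) + 1), p.2 ++ [v])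
  else p

-- A's 'while q:' loop; fuel only makes the recursion total (inside Pre_solve the
-- queue empties well within the fuel supplied by solve)
def bfsA (g : List (List Int)) : Nat → List Int → List Int → List Int
  | 0, dist, _ => dist
  | _ + 1, dist, [] => dist
  | fuel + 1, dist, u :: rest =>
    let s := (PySem.List.pyGetD g u []).foldl (bodyA u) (dist, rest)
    bfsA g fuel s.1 s.2

def solve (n : Int) (g : List (List Int)) (types : List Int) (k : Int) : List Int :=
  let dist0 := PySem.List.pySetD (List.replicate (n + 1).toNat (-1 : Int)) 1 0
  let dist := bfsA g ((n + 1).toNat + 1) dist0 [1]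
  let maxd := (PySem.List.pyRange 1 (n + 1) 1).foldl
      (fun md i =>
        let t := PySem.List.pyGetD types (i - 1) 0
        PySem.List.pySetD md t (max (PySem.List.pyGetD md t (-1)) (PySem.List.pyGetD dist i (-1))))
      (List.replicate (k + 1).toNat (-1 : Int))
  PySem.List.slice maxd (some 1) none

-- ===== PORT B =====
-- inner 'for v in g[u]: if dist[v] == -1: dist[v] = d + 1' of B's sweep
def relaxB (d : Int) (dist : List Int) (v : Int) : List Int :=
  if PySem.List.pyGetD dist v (-1) = -1 then PySem.List.pySetD dist v (d + 1) else dist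

-- one round of B: 'for u in range(n+1): if dist[u] == d: for v in g[u]: …'
def roundB (g : List (List Int)) (n : Int) (dist : List Int) (d : Int) : List Int :=
  (PySem.List.pyRange 0 (n + 1) 1).foldl
    (fun dist u =>
      if PySem.List.pyGetD dist u (-1) = d
      then (PySem.List.pyGetD g u []).foldl (relaxB d) dist else dist)
    dist

def solve_alt (n : Int) (g : List (List Int)) (types : List Int) (k : Int) : List Int :=
  let dist0 := PySem.List.pySetD (List.replicate (n + 1).toNat (-1 : Int)) 1 0
  let dist := (PySem.List.pyRange 0 (n + 1) 1).foldl (roundB g n) dist0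
  let maxd := (types.zip (PySem.List.slice dist (some 1) none)).foldl
      (fun md p => PySem.List.pySetD md p.1 (max (PySem.List.pyGetD md p.1 (-1)) p.2))
      (List.replicate (k + 1).toNat (-1 : Int))
  PySem.List.slice maxd (some 1) none

-- ===== PRECONDITION & SPEC =====
-- Pre_solve: 1 ≤ n, a row for node 1, at least n types with the first n valid
-- Python indices into max_dist (length k+1), and a graph shape keeping the BFS
-- in range: either everything node 1 points at is an in-range node id whose own
-- row is empty (or is node 1 again), or the graph has at least n+1 rows whose
-- first n+1 rows only hold node ids in 0..n.  It excludes malformed graphs on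
-- which A can still return (edge values outside 0..n read other rows through
-- Python's negative-index wraparound, and deeper graphs whose out-of-range rows
-- merely happen to be unreachable); B's index-driven sweep does not reproduce
-- those accidents.
def Pre_solve (n : Int) (g : List (List Int)) (types : List Int) (k : Int) : Prop :=
  1 ≤ n ∧ 2 ≤ g.length ∧ n.toNat ≤ types.length ∧
    (∀ t ∈ types.take n.toNat, -(k + 1) ≤ t ∧ t ≤ k) ∧
    ((∀ v ∈ PySem.List.pyGetD g 1 [], (0 ≤ v ∧ v ≤ n) ∧ (v : Int) < g.length ∧
        (v = 1 ∨ PySem.List.pyGetD g v [] = [])) ∨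
      ((n + 1).toNat ≤ g.length ∧
        ∀ row ∈ g.take (n + 1).toNat, ∀ v ∈ row, 0 ≤ v ∧ v ≤ n))

instance (n : Int) (g : List (List Int)) (types : List Int) (k : Int) :
    Decidable (Pre_solve n g types k) := by unfold Pre_solve; infer_instance

def pvWitness_solve : Int × List (List Int) × List Int × Int := (2, [[], [2], [1]], [1, 1], 1)

def Spec_solve (n : Int) (g : List (List Int)) (types : List Int) (k : Int) (out : List Int) : Prop :=
  out = solve_alt n g types k
instance (n : Int) (g : List (List Int)) (types : List Int) (k : Int) (out : List Int) :
    Decidable (Spec_solve n g types k out) := by unfold Spec_solve; infer_instance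

-- ===== CLAIM (what is proved, stated in full; the proofs are below) =====
def Claim_equal_solve : Prop := ∀ (n : Int) (g : List (List Int)) (types : List Int) (k : Int),
  Dom_solve n g types k → Pre_solve n g types k → Spec_solve n g types k (solve n g types k)

-- ===== LEMMAS AND PROOFS =====

-- the cell a Python index i denotes in a list of length len (valid for InRange i)
def nIdx (len : Nat) (i : Int) : Nat := (if i < 0 then (len : Int) + i else i).toNat

def cntNeg (l : List Int) : Nat := l.countP (fun c => decide (c = -1))

-- the level-synchronous frontier BFS: proof-only middle man between A's queue
-- BFS and B's round sweep
def procL (g : List (List Int)) (f : List Int) (p : List Int × List Int) :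
    List Int × List Int :=
  f.foldl (fun p u => (PySem.List.pyGetD g u []).foldl (bodyA u) p) p

def bfsL (g : List (List Int)) : Nat → List Int → List Int → List Int
  | 0, dist, _ => dist
  | _ + 1, dist, [] => dist
  | fuel + 1, dist, u :: rest =>
    let s := procL g (u :: rest) (dist, [])
    bfsL g fuel s.1 s.2

theorem nIdx_lt (len : Nat) (i : Int) (h : PySem.Raise.InRange len i) : nIdx len i < len := by
  simp [PySem.Raise.InRange] at h
  simp [nIdx]
  omega

theorem setD_eq_set (xs : List Int) (i x : Int) (h : PySem.Raise.InRange xs.length i) :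
    PySem.List.pySetD xs i x = xs.set (nIdx xs.length i) x := by
  simp [PySem.Raise.InRange] at h
  simp only [PySem.List.pySetD, PySem.List.pySet?, PySem.List.pyIdx?, nIdx]
  by_cases h0 : 0 ≤ i
  · rw [if_pos h0, if_pos (by omega), if_neg (by omega)]
    simp
  · rw [if_neg h0, if_pos (by omega), if_pos (by omega)]
    simp only [Option.map_some, Option.getD_some]
    congr 1
    omega

theorem getD_eq_getD (xs : List Int) (i d : Int) (h : PySem.Raise.InRange xs.length i) :
    PySem.List.pyGetD xs i d = xs.getD (nIdx xs.length i) d := by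
  have hlt := nIdx_lt xs.length i h
  simp [PySem.Raise.InRange] at h
  rw [List.getD_eq_getElem xs d hlt]
  by_cases h0 : 0 ≤ i
  · rw [PySem.List.pyGetD_eq_getElem xs d h0 (by omega)]
    congr 1
    simp [nIdx]
    omega
  · have hk1 : 0 < (-i).toNat := by omega
    have hk2 : (-i).toNat ≤ xs.length := by omega
    have hi : i = -(((-i).toNat : Nat) : Int) := by omega
    rw [show PySem.List.pyGetD xs i d = PySem.List.pyGetD xs (-(((-i).toNat : Nat) : Int)) d by
      rw [← hi]]
    rw [PySem.List.pyGetD_neg_natCast xs (-i).toNat d hk1 hk2]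
    congr 1
    simp [nIdx]
    omega

-- pyGetD at a nonnegative in-range index is plain getD at its toNat
theorem getD_nn (xs : List Int) (i d : Int) (h0 : 0 ≤ i) (h : i < (xs.length : Int)) :
    PySem.List.pyGetD xs i d = xs.getD i.toNat d := by
  have hr : PySem.Raise.InRange xs.length i := by simp [PySem.Raise.InRange]; omega
  rw [getD_eq_getD xs i d hr]
  congr 1
  simp [nIdx]
  omega

theorem getD_ge (xs : List Int) (i : Int) (hall : ∀ c ∈ xs, -1 ≤ c) :
    -1 ≤ PySem.List.pyGetD xs i (-1) := by
  by_cases h : PySem.Raise.InRange xs.length i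
  · rw [getD_eq_getD xs i (-1) h, List.getD_eq_getElem xs (-1) (nIdx_lt xs.length i h)]
    exact hall _ (List.getElem_mem _)
  · apply le_of_eq
    symm
    apply PySem.List.pyGetD_of_none
    simp only [PySem.List.pyGet?, PySem.List.pyIdx?, PySem.Raise.InRange, not_and, not_lt] at *
    split_ifs with a b c
    · omega
    · rfl
    · omega
    · rfl

theorem cntNeg_set (l : List Int) (i : Nat) (x : Int) (h : i < l.length)
    (hl : l[i] = -1) (hx : x ≠ -1) : cntNeg (l.set i x) + 1 = cntNeg l := by
  induction l generalizing i with
  | nil => simp at h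
  | cons a l ih =>
    cases i with
    | zero =>
      have ha : a = -1 := by simpa using hl
      subst ha
      simp [cntNeg, hx]
    | succ i =>
      have h' : i < l.length := by simpa using h
      have hl' : l[i] = -1 := by simpa using hl
      have := ih i h' hl'
      simp only [cntNeg, List.set_cons_succ, List.countP_cons] at this ⊢
      omega

theorem getD_set_int (l : List Int) (i j : Nat) (x d : Int) :
    (l.set i x).getD j d = if i = j ∧ j < l.length then x else l.getD j d := by
  by_cases hj : j < l.length
  · rw [List.getD_eq_getElem _ d (by simpa using hj), List.getD_eq_getElem l d hj,
      List.getElem_set]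
    by_cases hij : i = j <;> simp [hij, hj]
  · rw [List.getD_eq_default _ d (by simpa using Nat.le_of_not_lt hj),
      List.getD_eq_default _ d (Nat.le_of_not_lt hj)]
    simp [hj]

theorem bfsA_nil (g : List (List Int)) (fuel : Nat) (dist : List Int) :
    bfsA g fuel dist [] = dist := by cases fuel <;> rfl

theorem bfsL_nil (g : List (List Int)) (fuel : Nat) (dist : List Int) :
    bfsL g fuel dist [] = dist := by cases fuel <;> rfl

theorem bfsA_cons (g : List (List Int)) (fuel : Nat) (dist : List Int) (u : Int)
    (rest : List Int) :
    bfsA g (fuel + 1) dist (u :: rest)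
      = bfsA g fuel ((PySem.List.pyGetD g u []).foldl (bodyA u) (dist, rest)).1
          ((PySem.List.pyGetD g u []).foldl (bodyA u) (dist, rest)).2 := rfl

theorem bfsL_cons (g : List (List Int)) (fuel : Nat) (dist : List Int) (u : Int)
    (rest : List Int) :
    bfsL g (fuel + 1) dist (u :: rest)
      = bfsL g fuel (procL g (u :: rest) (dist, [])).1
          (procL g (u :: rest) (dist, [])).2 := rfl

theorem inner_shift (u : Int) : ∀ (es : List Int) (dist rest acc : List Int),
    es.foldl (bodyA u) (dist, rest ++ acc)
      = ((es.foldl (bodyA u) (dist, acc)).1,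
         rest ++ (es.foldl (bodyA u) (dist, acc)).2) := by
  intro es
  induction es with
  | nil => intro dist rest acc; rfl
  | cons v es ih =>
    intro dist rest acc
    simp only [List.foldl_cons]
    by_cases hc : PySem.List.pyGetD dist v (-1) = -1
    · simp only [bodyA, hc, if_pos]
      rw [List.append_assoc]
      exact ih _ rest (acc ++ [v])
    · simp only [bodyA, hc, ite_false]
      exact ih dist rest acc

theorem levelA (g : List (List Int)) : ∀ (f : List Int) (fuel : Nat) (dist acc : List Int),
    bfsA g (f.length + fuel) dist (f ++ acc)
      = bfsA g fuel (procL g f (dist, acc)).1 (procL g f (dist, acc)).2 := by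
  intro f
  induction f with
  | nil => intro fuel dist acc; simp [procL]
  | cons u f ih =>
    intro fuel dist acc
    have hlen : (u :: f).length + fuel = (f.length + fuel) + 1 := by simp; omega
    rw [hlen]
    show bfsA g ((f.length + fuel) + 1) dist (u :: (f ++ acc)) = _
    rw [bfsA_cons]
    rw [inner_shift u _ dist f acc]
    exact ih fuel _ _

-- one node's expansion preserves the loop invariants (A's inner fold)
theorem nodeInv (n : Int) (hn : 1 ≤ n) (u : Int) (Hs : Int → Prop) :
    ∀ (es : List Int), (∀ v ∈ es, (0 ≤ v ∧ v < n + 1) ∧ Hs v) →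
    ∀ (dist acc : List Int), dist.length = (n + 1).toNat → (∀ c ∈ dist, -1 ≤ c) →
      (es.foldl (bodyA u) (dist, acc)).1.length = (n + 1).toNat ∧
      (∀ c ∈ (es.foldl (bodyA u) (dist, acc)).1, -1 ≤ c) ∧
      ∃ Δ, (es.foldl (bodyA u) (dist, acc)).2 = acc ++ Δ ∧
        (∀ x ∈ Δ, (0 ≤ x ∧ x < n + 1) ∧ Hs x) ∧
        cntNeg (es.foldl (bodyA u) (dist, acc)).1 + Δ.length = cntNeg dist := by
  intro es
  induction es with
  | nil =>
    intro _ dist acc hdl hdc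
    exact ⟨hdl, hdc, [], by simp, by simp, by simp⟩
  | cons v es ih =>
    intro hes dist acc hdl hdc
    have hv := hes v (by simp)
    have hes' : ∀ w ∈ es, (0 ≤ w ∧ w < n + 1) ∧ Hs w := fun w hw => hes w (by simp [hw])
    simp only [List.foldl_cons]
    by_cases hc : PySem.List.pyGetD dist v (-1) = -1
    · have hbody : bodyA u (dist, acc) v
          = (PySem.List.pySetD dist v (PySem.List.pyGetD dist u (-1) + 1), acc ++ [v]) := by
        simp [bodyA, hc]
      rw [hbody]
      set d := PySem.List.pyGetD dist u (-1) + 1 with hd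
      have hdge : 0 ≤ d := by
        have := getD_ge dist u hdc
        omega
      have hvb := hv.1
      have hvr : PySem.Raise.InRange dist.length v := by
        simp [PySem.Raise.InRange]; omega
      have hdl' : (PySem.List.pySetD dist v d).length = (n + 1).toNat := by
        rw [PySem.List.length_pySetD]; exact hdl
      have hdc' : ∀ c ∈ PySem.List.pySetD dist v d, -1 ≤ c := by
        intro c hcm
        rw [setD_eq_set dist v d hvr] at hcm
        rcases List.mem_or_eq_of_mem_set hcm with h | h
        · exact hdc _ h
        · omega
      have hcnt : cntNeg (PySem.List.pySetD dist v d) + 1 = cntNeg dist := by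
        rw [setD_eq_set dist v d hvr]
        refine cntNeg_set dist (nIdx dist.length v) d (nIdx_lt _ _ hvr) ?_ (by omega)
        have := getD_eq_getD dist v (-1) hvr
        rw [this, List.getD_eq_getElem dist (-1) (nIdx_lt _ _ hvr)] at hc
        exact hc
      obtain ⟨h1, h2, Δ, hΔeq, hΔmem, hΔcnt⟩ :=
        ih hes' (PySem.List.pySetD dist v d) (acc ++ [v]) hdl' hdc'
      refine ⟨h1, h2, v :: Δ, ?_, ?_, ?_⟩
      · rw [hΔeq]; simp
      · intro x hx
        rcases List.mem_cons.mp hx with h | h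
        · subst h; exact hv
        · exact hΔmem _ h
      · simp only [List.length_cons]
        omega
    · have hbody : bodyA u (dist, acc) v = (dist, acc) := by simp [bodyA, hc]
      rw [hbody]
      exact ih hes' dist acc hdl hdc

-- a whole frontier's expansion preserves the invariants
theorem procInv (n : Int) (g : List (List Int)) (hn : 1 ≤ n) (Hs : Int → Prop)
    (hSrow : ∀ u : Int, Hs u →
      ∀ v ∈ PySem.List.pyGetD g u [], (0 ≤ v ∧ v < n + 1) ∧ Hs v) :
    ∀ (f : List Int), (∀ u ∈ f, (0 ≤ u ∧ u < n + 1) ∧ Hs u) →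
    ∀ (dist acc : List Int), dist.length = (n + 1).toNat → (∀ c ∈ dist, -1 ≤ c) →
      (procL g f (dist, acc)).1.length = (n + 1).toNat ∧
      (∀ c ∈ (procL g f (dist, acc)).1, -1 ≤ c) ∧
      ∃ Δ, (procL g f (dist, acc)).2 = acc ++ Δ ∧
        (∀ x ∈ Δ, (0 ≤ x ∧ x < n + 1) ∧ Hs x) ∧
        cntNeg (procL g f (dist, acc)).1 + Δ.length = cntNeg dist := by
  intro f
  induction f with
  | nil =>
    intro _ dist acc hdl hdc
    exact ⟨hdl, hdc, [], by simp [procL], by simp, by simp [procL]⟩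
  | cons u f ih =>
    intro hf dist acc hdl hdc
    have hu := hf u (by simp)
    have hf' : ∀ w ∈ f, (0 ≤ w ∧ w < n + 1) ∧ Hs w := fun w hw => hf w (by simp [hw])
    have hes : ∀ v ∈ PySem.List.pyGetD g u [], (0 ≤ v ∧ v < n + 1) ∧ Hs v :=
      hSrow u hu.2
    obtain ⟨h1, h2, Δ₁, hΔ₁eq, hΔ₁mem, hΔ₁cnt⟩ :=
      nodeInv n hn u Hs (PySem.List.pyGetD g u []) hes dist acc hdl hdc
    have hprocL : procL g (u :: f) (dist, acc)
        = procL g f ((PySem.List.pyGetD g u []).foldl (bodyA u) (dist, acc)) := rfl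
    rw [hprocL]
    obtain ⟨h1', h2', Δ₂, hΔ₂eq, hΔ₂mem, hΔ₂cnt⟩ :=
      ih hf' ((PySem.List.pyGetD g u []).foldl (bodyA u) (dist, acc)).1
        ((PySem.List.pyGetD g u []).foldl (bodyA u) (dist, acc)).2 h1 h2
    simp only [Prod.mk.eta] at h1' h2' hΔ₂eq hΔ₂cnt
    refine ⟨h1', h2', Δ₁ ++ Δ₂, ?_, ?_, ?_⟩
    · rw [hΔ₂eq, hΔ₁eq, List.append_assoc]
    · intro x hx
      rcases List.mem_append.mp hx with h | h
      · exact hΔ₁mem _ h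
      · exact hΔ₂mem _ h
    · rw [List.length_append]
      omega

-- A's queue BFS and the level-synchronous BFS compute the same distance table
theorem mainEq (n : Int) (g : List (List Int)) (hn : 1 ≤ n) (Hs : Int → Prop)
    (hSrow : ∀ u : Int, Hs u →
      ∀ v ∈ PySem.List.pyGetD g u [], (0 ≤ v ∧ v < n + 1) ∧ Hs v) :
    ∀ (fB : Nat) (f dist : List Int) (fA : Nat),
      (∀ u ∈ f, (0 ≤ u ∧ u < n + 1) ∧ Hs u) →
      dist.length = (n + 1).toNat → (∀ c ∈ dist, -1 ≤ c) →
      cntNeg dist + f.length ≤ fA → cntNeg dist + 1 ≤ fB →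
      bfsA g fA dist f = bfsL g fB dist f := by
  intro fB
  induction fB with
  | zero =>
    intro f dist fA _ _ _ _ hfB
    exact absurd hfB (by omega)
  | succ fB ih =>
    intro f dist fA hf hdl hdc hfA hfB
    cases f with
    | nil => rw [bfsA_nil, bfsL_nil]
    | cons u f' =>
      obtain ⟨h1, h2, Δ, hΔeq, hΔmem, hΔcnt⟩ :=
        procInv n g hn Hs hSrow (u :: f') hf dist [] hdl hdc
      simp only [List.nil_append] at hΔeq
      obtain ⟨fA', rfl⟩ : ∃ fA', fA = (u :: f').length + fA' :=
        ⟨fA - (u :: f').length, by simp at hfA ⊢; omega⟩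
      have hAstep : bfsA g ((u :: f').length + fA') dist (u :: f')
          = bfsA g fA' (procL g (u :: f') (dist, [])).1
              (procL g (u :: f') (dist, [])).2 := by
        have := levelA g (u :: f') fA' dist []
        simpa using this
      rw [bfsL_cons, hAstep]
      rcases hΔnil : Δ with _ | ⟨x, Δ'⟩
      · subst hΔnil
        rw [hΔeq, bfsA_nil, bfsL_nil]
      · have hlen1 : 1 ≤ Δ.length := by rw [hΔnil]; simp
        rw [hΔeq]
        apply ih Δ (procL g (u :: f') (dist, [])).1 fA' hΔmem h1 h2
        · simp only [List.length_cons] at hfA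
          omega
        · simp only [List.length_cons] at hfA hfB
          omega

-- characterization of the inner relax fold (B's edge loop)
theorem relaxChar (d : Int) (_hd : 0 ≤ d) :
    ∀ (es dist : List Int), (∀ v ∈ es, 0 ≤ v ∧ v < (dist.length : Int)) →
    (es.foldl (relaxB d) dist).length = dist.length ∧
    (∀ j : Nat, j < dist.length →
      ((dist.getD j (-1) = -1 ∧ ∃ v ∈ es, v.toNat = j) →
        (es.foldl (relaxB d) dist).getD j (-1) = d + 1) ∧
      (¬(dist.getD j (-1) = -1 ∧ ∃ v ∈ es, v.toNat = j) →
        (es.foldl (relaxB d) dist).getD j (-1) = dist.getD j (-1))) := by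
  intro es
  induction es with
  | nil =>
    intro dist _
    refine ⟨rfl, fun j hj => ⟨?_, fun _ => rfl⟩⟩
    rintro ⟨-, v, hv, -⟩
    exact absurd hv (List.not_mem_nil)
  | cons v es ih =>
    intro dist hb
    have hv := hb v (by simp)
    have hb' : ∀ w ∈ es, 0 ≤ w ∧ w < (dist.length : Int) := fun w hw => hb w (by simp [hw])
    simp only [List.foldl_cons]
    by_cases hc : dist.getD v.toNat (-1) = -1
    · have hstep : relaxB d dist v = dist.set v.toNat (d + 1) := by
        rw [relaxB, getD_nn dist v (-1) hv.1 hv.2, if_pos hc,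
          PySem.List.pySetD_of_nonneg _ _ hv.1]
      rw [hstep]
      have hlen : (dist.set v.toNat (d + 1)).length = dist.length := by simp
      obtain ⟨ihl, ihp⟩ := ih (dist.set v.toNat (d + 1)) (by rw [hlen]; exact hb')
      refine ⟨by rw [ihl, hlen], fun j hj => ?_⟩
      obtain ⟨ihy, ihn⟩ := ihp j (by omega)
      have hget : (dist.set v.toNat (d + 1)).getD j (-1)
          = if v.toNat = j ∧ j < dist.length then d + 1 else dist.getD j (-1) :=
        getD_set_int dist v.toNat j (d + 1) (-1)
      constructor
      · rintro ⟨hjm, w, hw, hwj⟩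
        rcases List.mem_cons.mp hw with rfl | hw'
        · subst hwj
          by_cases hagain : (dist.set w.toNat (d + 1)).getD w.toNat (-1) = -1 ∧
              ∃ x ∈ es, x.toNat = w.toNat
          · exact ihy hagain
          · rw [ihn hagain, hget, if_pos ⟨rfl, by omega⟩]
        · by_cases hagain : (dist.set v.toNat (d + 1)).getD j (-1) = -1 ∧
              ∃ x ∈ es, x.toNat = j
          · exact ihy hagain
          · rw [ihn hagain, hget]
            by_cases hvj : v.toNat = j
            · rw [if_pos ⟨hvj, by omega⟩]
            · push_neg at hagain
              rw [hget] at hagain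
              rw [if_neg (by tauto)] at hagain ⊢
              exact absurd hwj (hagain hjm w hw')
      · intro hno
        push_neg at hno
        by_cases hvj : v.toNat = j
        · subst hvj
          exact absurd rfl (hno hc v (by simp))
        · have hgj : (dist.set v.toNat (d + 1)).getD j (-1) = dist.getD j (-1) := by
            rw [hget, if_neg (by tauto)]
          rw [ihn, hgj]
          rw [hgj]
          rintro ⟨hjm, w, hw, hwj⟩
          exact absurd hwj (hno hjm w (by simp [hw]))
    · have hstep : relaxB d dist v = dist := by
        rw [relaxB, getD_nn dist v (-1) hv.1 hv.2, if_neg hc]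
      rw [hstep]
      obtain ⟨ihl, ihp⟩ := ih dist hb'
      refine ⟨ihl, fun j hj => ?_⟩
      obtain ⟨ihy, ihn⟩ := ihp j hj
      constructor
      · rintro ⟨hjm, w, hw, hwj⟩
        rcases List.mem_cons.mp hw with rfl | hw'
        · subst hwj
          exact absurd hjm hc
        · exact ihy ⟨hjm, w, hw', hwj⟩
      · intro hno
        push_neg at hno
        refine ihn ?_
        rintro ⟨hjm, w, hw, hwj⟩
        exact absurd hwj (hno hjm w (by simp [hw]))

-- A's edge loop equals B's relax fold and its appended queue entries are exactly
-- the newly discovered nodes, when the source node sits at level d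
theorem bodyFoldChar (d u : Int) (hd : 0 ≤ d) (hu : 0 ≤ u) :
    ∀ (es dist acc : List Int),
      (∀ v ∈ es, 0 ≤ v ∧ v < (dist.length : Int)) →
      u < (dist.length : Int) → dist.getD u.toNat (-1) = d →
      (es.foldl (bodyA u) (dist, acc)).1 = es.foldl (relaxB d) dist ∧
      (∀ x, x ∈ (es.foldl (bodyA u) (dist, acc)).2 ↔
        x ∈ acc ∨ (x ∈ es ∧ dist.getD x.toNat (-1) = -1)) := by
  intro es
  induction es with
  | nil =>
    intro dist acc _ _ _
    exact ⟨rfl, fun x => by simp⟩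
  | cons v es ih =>
    intro dist acc hb hulen hud
    have hv := hb v (by simp)
    have hb' : ∀ w ∈ es, 0 ≤ w ∧ w < (dist.length : Int) := fun w hw => hb w (by simp [hw])
    simp only [List.foldl_cons]
    by_cases hc : dist.getD v.toNat (-1) = -1
    · have hstepA : bodyA u (dist, acc) v = (dist.set v.toNat (d + 1), acc ++ [v]) := by
        rw [bodyA]
        simp only
        rw [getD_nn dist v (-1) hv.1 hv.2, if_pos hc,
          getD_nn dist u (-1) hu hulen, hud,
          PySem.List.pySetD_of_nonneg _ _ hv.1]
      have hstepB : relaxB d dist v = dist.set v.toNat (d + 1) := by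
        rw [relaxB, getD_nn dist v (-1) hv.1 hv.2, if_pos hc,
          PySem.List.pySetD_of_nonneg _ _ hv.1]
      rw [hstepA, hstepB]
      have hune : v.toNat ≠ u.toNat := by
        intro he
        rw [← he] at hud
        rw [hud] at hc
        omega
      have hud' : (dist.set v.toNat (d + 1)).getD u.toNat (-1) = d := by
        rw [getD_set_int, if_neg (by tauto)]
        exact hud
      obtain ⟨ih1, ih2⟩ := ih (dist.set v.toNat (d + 1)) (acc ++ [v])
        (by simpa using hb') (by simpa using hulen) hud'
      refine ⟨ih1, fun x => ?_⟩
      rw [ih2 x]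
      have hset : ∀ j : Nat, j < dist.length →
          ((dist.set v.toNat (d + 1)).getD j (-1) = -1 ↔
            dist.getD j (-1) = -1 ∧ v.toNat ≠ j) := by
        intro j hj
        rw [getD_set_int]
        by_cases hvj : v.toNat = j
        · rw [if_pos ⟨hvj, hj⟩]
          constructor
          · intro h; omega
          · rintro ⟨-, h⟩; exact absurd hvj h
        · rw [if_neg (by tauto)]
          tauto
      constructor
      · rintro (hx | ⟨hxe, hxd⟩)
        · rcases List.mem_append.mp hx with hx | hx
          · exact Or.inl hx
          · simp at hx
            subst hx
            exact Or.inr ⟨by simp, hc⟩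
        · have hxb := hb' x hxe
          have := (hset x.toNat (by omega)).mp hxd
          exact Or.inr ⟨by simp [hxe], this.1⟩
      · rintro (hx | ⟨hxe, hxd⟩)
        · exact Or.inl (List.mem_append.mpr (Or.inl hx))
        · by_cases hxv : x = v
          · subst hxv
            exact Or.inl (by simp)
          · rcases List.mem_cons.mp hxe with rfl | hxe'
            · exact absurd rfl hxv
            · have hxb := hb' x hxe'
              refine Or.inr ⟨hxe', (hset x.toNat (by omega)).mpr ⟨hxd, ?_⟩⟩
              intro he
              exact hxv (by omega)
    · have hstepA : bodyA u (dist, acc) v = (dist, acc) := by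
        rw [bodyA]
        simp only
        rw [getD_nn dist v (-1) hv.1 hv.2, if_neg hc]
      have hstepB : relaxB d dist v = dist := by
        rw [relaxB, getD_nn dist v (-1) hv.1 hv.2, if_neg hc]
      rw [hstepA, hstepB]
      obtain ⟨ih1, ih2⟩ := ih dist acc hb' hulen hud
      refine ⟨ih1, fun x => ?_⟩
      rw [ih2 x]
      constructor
      · rintro (hx | ⟨hxe, hxd⟩)
        · exact Or.inl hx
        · exact Or.inr ⟨by simp [hxe], hxd⟩
      · rintro (hx | ⟨hxe, hxd⟩)
        · exact Or.inl hx
        · rcases List.mem_cons.mp hxe with rfl | hxe'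
          · exact absurd hxd hc
          · exact Or.inr ⟨hxe', hxd⟩

-- characterization of a whole frontier expansion (dist part and new frontier)
theorem procChar (n : Int) (g : List (List Int)) (hn : 1 ≤ n) (d : Int) (hd : 0 ≤ d) :
    ∀ (f dist acc : List Int),
      (∀ u ∈ f, 0 ≤ u ∧ u < n + 1) →
      (∀ u ∈ f, ∀ v ∈ PySem.List.pyGetD g u [], 0 ≤ v ∧ v < n + 1) →
      dist.length = (n + 1).toNat →
      (∀ u ∈ f, dist.getD u.toNat (-1) = d) →
      (procL g f (dist, acc)).1.length = (n + 1).toNat ∧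
      (∀ j : Nat, j < (n + 1).toNat →
        ((dist.getD j (-1) = -1 ∧ ∃ u ∈ f, ∃ v ∈ PySem.List.pyGetD g u [], v.toNat = j) →
          (procL g f (dist, acc)).1.getD j (-1) = d + 1) ∧
        (¬(dist.getD j (-1) = -1 ∧ ∃ u ∈ f, ∃ v ∈ PySem.List.pyGetD g u [], v.toNat = j) →
          (procL g f (dist, acc)).1.getD j (-1) = dist.getD j (-1))) ∧
      (∀ x, x ∈ (procL g f (dist, acc)).2 ↔
        x ∈ acc ∨ (0 ≤ x ∧ x < n + 1 ∧ dist.getD x.toNat (-1) = -1 ∧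
          ∃ u ∈ f, x ∈ PySem.List.pyGetD g u [])) := by
  intro f
  induction f with
  | nil =>
    intro dist acc _ _ hdl _
    refine ⟨hdl, fun j hj => ⟨?_, fun _ => rfl⟩, fun x => by simp [procL]⟩
    rintro ⟨-, u, hu, -⟩
    exact absurd hu (List.not_mem_nil)
  | cons u₀ f ih =>
    intro dist acc hf hfrow hdl hflev
    have hNlen : (dist.length : Int) = n + 1 := by omega
    have hu := hf u₀ (by simp)
    have hf' : ∀ w ∈ f, 0 ≤ w ∧ w < n + 1 := fun w hw => hf w (by simp [hw])
    have hfrow' : ∀ w ∈ f, ∀ v ∈ PySem.List.pyGetD g w [], 0 ≤ v ∧ v < n + 1 :=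
      fun w hw => hfrow w (by simp [hw])
    have hes := hfrow u₀ (by simp)
    have hbnd : ∀ v ∈ PySem.List.pyGetD g u₀ [], 0 ≤ v ∧ v < (dist.length : Int) := by
      intro v hv
      have := hes v hv
      omega
    obtain ⟨hbf1, hbf2⟩ := bodyFoldChar d u₀ hd hu.1 (PySem.List.pyGetD g u₀ []) dist acc
      hbnd (by omega) (hflev u₀ (by simp))
    obtain ⟨hrl, hrp⟩ := relaxChar d hd (PySem.List.pyGetD g u₀ []) dist hbnd
    set dist₁ := (PySem.List.pyGetD g u₀ []).foldl (relaxB d) dist with hdist₁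
    set acc₁ := ((PySem.List.pyGetD g u₀ []).foldl (bodyA u₀) (dist, acc)).2 with hacc₁
    have hpair : (PySem.List.pyGetD g u₀ []).foldl (bodyA u₀) (dist, acc) = (dist₁, acc₁) := by
      rw [← hbf1]
    have hcons : procL g (u₀ :: f) (dist, acc) = procL g f (dist₁, acc₁) := by
      show procL g f ((PySem.List.pyGetD g u₀ []).foldl (bodyA u₀) (dist, acc)) = _
      rw [hpair]
    have hd₁l : dist₁.length = (n + 1).toNat := by rw [hrl]; exact hdl
    -- during the round, level-d cells are untouched
    have hkeepd : ∀ w : Int, 0 ≤ w → w < n + 1 → dist.getD w.toNat (-1) = d →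
        dist₁.getD w.toNat (-1) = d := by
      intro w hw0 hw1 hwd
      obtain ⟨-, hno⟩ := hrp w.toNat (by omega)
      rw [hno, hwd]
      rintro ⟨hneg, -⟩
      rw [hwd] at hneg
      omega
    have hflev₁ : ∀ w ∈ f, dist₁.getD w.toNat (-1) = d := by
      intro w hw
      exact hkeepd w (hf' w hw).1 (hf' w hw).2 (hflev w (by simp [hw]))
    obtain ⟨ih1, ih2, ih3⟩ := ih dist₁ acc₁ hf' hfrow' hd₁l hflev₁
    rw [hcons]
    -- dist₁ pointwise vs dist
    have hpt : ∀ j : Nat, j < (n + 1).toNat →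
        (dist₁.getD j (-1) = d + 1 ∨ dist₁.getD j (-1) = dist.getD j (-1)) := by
      intro j hj
      obtain ⟨hy, hno⟩ := hrp j (by omega)
      by_cases hC : dist.getD j (-1) = -1 ∧ ∃ v ∈ PySem.List.pyGetD g u₀ [], v.toNat = j
      · exact Or.inl (hy hC)
      · exact Or.inr (hno hC)
    have hneg₁ : ∀ j : Nat, j < (n + 1).toNat →
        (dist₁.getD j (-1) = -1 ↔ dist.getD j (-1) = -1 ∧
          ¬∃ v ∈ PySem.List.pyGetD g u₀ [], v.toNat = j) := by
      intro j hj
      obtain ⟨hy, hno⟩ := hrp j (by omega)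
      by_cases hC : dist.getD j (-1) = -1 ∧ ∃ v ∈ PySem.List.pyGetD g u₀ [], v.toNat = j
      · rw [hy hC]
        constructor
        · intro h; omega
        · rintro ⟨-, hnx⟩; exact absurd hC.2 hnx
      · rw [hno hC]
        tauto
    refine ⟨ih1, fun j hj => ?_, fun x => ?_⟩
    · obtain ⟨ihy, ihn⟩ := ih2 j hj
      constructor
      · rintro ⟨hjm, w, hw, v, hvr, hvj⟩
        rcases List.mem_cons.mp hw with rfl | hw'
        · -- discovered by u₀ itself
          have h1 : dist₁.getD j (-1) = d + 1 := by
            obtain ⟨hy, -⟩ := hrp j (by omega)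
            exact hy ⟨hjm, v, hvr, hvj⟩
          rw [ihn (by rw [h1]; rintro ⟨h, -⟩; omega), h1]
        · rcases hpt j hj with h1 | h1
          · rw [ihn (by rw [h1]; rintro ⟨h, -⟩; omega), h1]
          · exact ihy ⟨by rw [h1]; exact hjm, w, hw', v, hvr, hvj⟩
      · intro hno
        have hC0 : ¬(dist.getD j (-1) = -1 ∧
            ∃ v ∈ PySem.List.pyGetD g u₀ [], v.toNat = j) := by
          rintro ⟨h1, v, hvr, hvj⟩
          exact hno ⟨h1, u₀, by simp, v, hvr, hvj⟩
        obtain ⟨-, hkeep⟩ := hrp j (by omega)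
        have h1 : dist₁.getD j (-1) = dist.getD j (-1) := hkeep hC0
        have hC1 : ¬(dist₁.getD j (-1) = -1 ∧
            ∃ u ∈ f, ∃ v ∈ PySem.List.pyGetD g u [], v.toNat = j) := by
          rintro ⟨h2, w, hw, v, hvr, hvj⟩
          exact hno ⟨by rw [← h1]; exact h2, w, by simp [hw], v, hvr, hvj⟩
        rw [ihn hC1, h1]
    · rw [ih3 x, hbf2 x]
      have hmem_iff : ∀ (hx0 : 0 ≤ x), x < n + 1 →
          ((∃ v ∈ PySem.List.pyGetD g u₀ [], v.toNat = x.toNat) ↔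
            x ∈ PySem.List.pyGetD g u₀ []) := by
        intro hx0 hx1
        constructor
        · rintro ⟨v, hv, hvx⟩
          have := hes v hv
          have : v = x := by omega
          subst this
          exact hv
        · intro h
          exact ⟨x, h, rfl⟩
      constructor
      · rintro ((hx | ⟨hxr, hxd⟩) | ⟨hx0, hx1, hxd, w, hw, hxw⟩)
        · exact Or.inl hx
        · have := hes x hxr
          exact Or.inr ⟨this.1, this.2, hxd, u₀, by simp, hxr⟩
        · have := (hneg₁ x.toNat (by omega)).mp hxd
          exact Or.inr ⟨hx0, hx1, this.1, w, by simp [hw], hxw⟩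
      · rintro (hx | ⟨hx0, hx1, hxd, w, hw, hxw⟩)
        · exact Or.inl (Or.inl hx)
        · rcases List.mem_cons.mp hw with rfl | hw'
          · exact Or.inl (Or.inr ⟨hxw, hxd⟩)
          · by_cases hx0r : x ∈ PySem.List.pyGetD g u₀ []
            · exact Or.inl (Or.inr ⟨hx0r, hxd⟩)
            · refine Or.inr ⟨hx0, hx1, ?_, w, hw', hxw⟩
              rw [hneg₁ x.toNat (by omega)]
              refine ⟨hxd, ?_⟩
              rw [hmem_iff hx0 hx1]
              exact hx0r

-- characterization of one round of B's sweep
theorem roundChar (n : Int) (g : List (List Int)) (hn : 1 ≤ n) (d : Int) (hd : 0 ≤ d) :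
    ∀ (us dist : List Int),
      (∀ u ∈ us, 0 ≤ u ∧ u < n + 1) →
      (∀ u : Int, 0 ≤ u → u < n + 1 → dist.getD u.toNat (-1) = d →
        ∀ v ∈ PySem.List.pyGetD g u [], 0 ≤ v ∧ v < n + 1) →
      dist.length = (n + 1).toNat →
      (us.foldl (fun dist u =>
          if PySem.List.pyGetD dist u (-1) = d
          then (PySem.List.pyGetD g u []).foldl (relaxB d) dist else dist) dist).length
        = (n + 1).toNat ∧
      (∀ j : Nat, j < (n + 1).toNat →
        ((dist.getD j (-1) = -1 ∧ ∃ u ∈ us, dist.getD u.toNat (-1) = d ∧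
            ∃ v ∈ PySem.List.pyGetD g u [], v.toNat = j) →
          (us.foldl (fun dist u =>
              if PySem.List.pyGetD dist u (-1) = d
              then (PySem.List.pyGetD g u []).foldl (relaxB d) dist else dist) dist).getD j (-1)
            = d + 1) ∧
        (¬(dist.getD j (-1) = -1 ∧ ∃ u ∈ us, dist.getD u.toNat (-1) = d ∧
            ∃ v ∈ PySem.List.pyGetD g u [], v.toNat = j) →
          (us.foldl (fun dist u =>
              if PySem.List.pyGetD dist u (-1) = d
              then (PySem.List.pyGetD g u []).foldl (relaxB d) dist else dist) dist).getD j (-1)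
            = dist.getD j (-1))) := by
  intro us
  induction us with
  | nil =>
    intro dist _ _ hdl
    refine ⟨hdl, fun j hj => ⟨?_, fun _ => rfl⟩⟩
    rintro ⟨-, u, hu, -⟩
    exact absurd hu (List.not_mem_nil)
  | cons u₀ us ih =>
    intro dist hus hlevrow hdl
    have hNlen : (dist.length : Int) = n + 1 := by omega
    have hu := hus u₀ (by simp)
    have hus' : ∀ w ∈ us, 0 ≤ w ∧ w < n + 1 := fun w hw => hus w (by simp [hw])
    simp only [List.foldl_cons]
    rw [getD_nn dist u₀ (-1) hu.1 (by omega)]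
    by_cases hC0 : dist.getD u₀.toNat (-1) = d
    · rw [if_pos hC0]
      have hes := hlevrow u₀ hu.1 hu.2 hC0
      have hbnd : ∀ v ∈ PySem.List.pyGetD g u₀ [], 0 ≤ v ∧ v < (dist.length : Int) := by
        intro v hv
        have := hes v hv
        omega
      obtain ⟨hrl, hrp⟩ := relaxChar d hd (PySem.List.pyGetD g u₀ []) dist hbnd
      set dist₁ := (PySem.List.pyGetD g u₀ []).foldl (relaxB d) dist with hdist₁
      have hd₁l : dist₁.length = (n + 1).toNat := by rw [hrl]; exact hdl
      have hlev : ∀ j : Nat, j < (n + 1).toNat →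
          (dist₁.getD j (-1) = d ↔ dist.getD j (-1) = d) := by
        intro j hj
        obtain ⟨hy, hno⟩ := hrp j (by omega)
        by_cases hC : dist.getD j (-1) = -1 ∧ ∃ v ∈ PySem.List.pyGetD g u₀ [], v.toNat = j
        · rw [hy hC]
          constructor
          · intro h; omega
          · intro h; rw [h] at hC; omega
        · rw [hno hC]
      have hlevrow₁ : ∀ u : Int, 0 ≤ u → u < n + 1 → dist₁.getD u.toNat (-1) = d →
          ∀ v ∈ PySem.List.pyGetD g u [], 0 ≤ v ∧ v < n + 1 := by
        intro u hu0 hu1 hud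
        exact hlevrow u hu0 hu1 ((hlev u.toNat (by omega)).mp hud)
      obtain ⟨ih1, ih2⟩ := ih dist₁ hus' hlevrow₁ hd₁l
      refine ⟨ih1, fun j hj => ?_⟩
      obtain ⟨ihy, ihn⟩ := ih2 j hj
      constructor
      · rintro ⟨hjm, w, hw, hwd, v, hvr, hvj⟩
        rcases List.mem_cons.mp hw with rfl | hw'
        · have h1 : dist₁.getD j (-1) = d + 1 := by
            obtain ⟨hy, -⟩ := hrp j (by omega)
            exact hy ⟨hjm, v, hvr, hvj⟩
          rw [ihn (by rw [h1]; rintro ⟨h, -⟩; omega), h1]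
        · obtain ⟨hy, hno⟩ := hrp j (by omega)
          by_cases hC : dist.getD j (-1) = -1 ∧ ∃ v ∈ PySem.List.pyGetD g u₀ [], v.toNat = j
          · have h1 := hy hC
            rw [ihn (by rw [h1]; rintro ⟨h, -⟩; omega), h1]
          · have h1 := hno hC
            have hwb := hus' w hw'
            refine ihy ⟨by rw [h1]; exact hjm, w, hw', ?_, v, hvr, hvj⟩
            rw [hlev w.toNat (by omega)]
            exact hwd
      · intro hno
        have hC0' : ¬(dist.getD j (-1) = -1 ∧
            ∃ v ∈ PySem.List.pyGetD g u₀ [], v.toNat = j) := by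
          rintro ⟨h1, v, hvr, hvj⟩
          exact hno ⟨h1, u₀, by simp, hC0, v, hvr, hvj⟩
        obtain ⟨-, hkeep⟩ := hrp j (by omega)
        have h1 : dist₁.getD j (-1) = dist.getD j (-1) := hkeep hC0'
        have hC1 : ¬(dist₁.getD j (-1) = -1 ∧ ∃ u ∈ us, dist₁.getD u.toNat (-1) = d ∧
            ∃ v ∈ PySem.List.pyGetD g u [], v.toNat = j) := by
          rintro ⟨h2, w, hw, hwd, v, hvr, hvj⟩
          have hwb := hus' w hw
          refine hno ⟨by rw [← h1]; exact h2, w, by simp [hw], ?_, v, hvr, hvj⟩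
          rw [← hlev w.toNat (by omega)]
          exact hwd
        rw [ihn hC1, h1]
    · rw [if_neg hC0]
      obtain ⟨ih1, ih2⟩ := ih dist hus' hlevrow hdl
      refine ⟨ih1, fun j hj => ?_⟩
      obtain ⟨ihy, ihn⟩ := ih2 j hj
      constructor
      · rintro ⟨hjm, w, hw, hwd, v, hvr, hvj⟩
        rcases List.mem_cons.mp hw with rfl | hw'
        · exact absurd hwd hC0
        · exact ihy ⟨hjm, w, hw', hwd, v, hvr, hvj⟩
      · intro hno
        refine ihn ?_
        rintro ⟨hjm, w, hw, hwd, v, hvr, hvj⟩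
        exact hno ⟨hjm, w, by simp [hw], hwd, v, hvr, hvj⟩

-- one round of B equals one frontier expansion, given the frontier is exactly the
-- set of level-d nodes
theorem roundEq (n : Int) (g : List (List Int)) (hn : 1 ≤ n) (d : Int) (hd : 0 ≤ d)
    (f dist : List Int)
    (hfrow : ∀ u ∈ f, ∀ v ∈ PySem.List.pyGetD g u [], 0 ≤ v ∧ v < n + 1)
    (hf : ∀ u ∈ f, 0 ≤ u ∧ u < n + 1) (hdl : dist.length = (n + 1).toNat)
    (hset : ∀ j : Nat, j < (n + 1).toNat → (dist.getD j (-1) = d ↔ ∃ u ∈ f, u.toNat = j)) :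
    roundB g n dist d = (procL g f (dist, [])).1 := by
  have hus : ∀ u ∈ PySem.List.pyRange 0 (n + 1) 1, 0 ≤ u ∧ u < n + 1 := by
    intro u hu
    rw [PySem.List.mem_pyRange_one] at hu
    exact hu
  have hflev : ∀ u ∈ f, dist.getD u.toNat (-1) = d := by
    intro u hu
    exact (hset u.toNat (by have := hf u hu; omega)).mpr ⟨u, hu, rfl⟩
  have hlevrow : ∀ u : Int, 0 ≤ u → u < n + 1 → dist.getD u.toNat (-1) = d →
      ∀ v ∈ PySem.List.pyGetD g u [], 0 ≤ v ∧ v < n + 1 := by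
    intro u hu0 hu1 hud
    obtain ⟨u', hu', hu't⟩ := (hset u.toNat (by omega)).mp hud
    have hub' := hf u' hu'
    have heq : u' = u := by omega
    subst heq
    exact hfrow u' hu'
  obtain ⟨hl1, hp1⟩ := roundChar n g hn d hd (PySem.List.pyRange 0 (n + 1) 1) dist hus
    hlevrow hdl
  obtain ⟨hl2, hp2, -⟩ := procChar n g hn d hd f dist [] hf hfrow hdl hflev
  show (PySem.List.pyRange 0 (n + 1) 1).foldl _ dist = _
  apply List.ext_getElem (by rw [hl1, hl2])
  intro j hj1 hj2
  have hjN : j < (n + 1).toNat := by rw [hl1] at hj1; exact hj1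
  rw [← List.getD_eq_getElem _ (-1) hj1, ← List.getD_eq_getElem _ (-1) hj2]
  obtain ⟨hy1, hn1⟩ := hp1 j hjN
  obtain ⟨hy2, hn2⟩ := hp2 j hjN
  have hCiff : (dist.getD j (-1) = -1 ∧ ∃ u ∈ PySem.List.pyRange 0 (n + 1) 1,
        dist.getD u.toNat (-1) = d ∧ ∃ v ∈ PySem.List.pyGetD g u [], v.toNat = j) ↔
      (dist.getD j (-1) = -1 ∧ ∃ u ∈ f, ∃ v ∈ PySem.List.pyGetD g u [], v.toNat = j) := by
    constructor
    · rintro ⟨h1, u, hu, hud, v, hvr, hvj⟩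
      have hub := hus u hu
      have hun : u.toNat < (n + 1).toNat := by
        clear hy1 hn1 hy2 hn2 hud h1 hvj
        omega
      obtain ⟨u', hu', hu't⟩ := (hset u.toNat hun).mp hud
      have hub' := hf u' hu'
      have heq : u' = u := by
        clear hy1 hn1 hy2 hn2 hud h1 hvj
        omega
      subst heq
      exact ⟨h1, u', hu', v, hvr, hvj⟩
    · rintro ⟨h1, u, hu, v, hvr, hvj⟩
      have hub := hf u hu
      refine ⟨h1, u, ?_, hflev u hu, v, hvr, hvj⟩
      rw [PySem.List.mem_pyRange_one]
      exact hub
  by_cases hC : dist.getD j (-1) = -1 ∧ ∃ u ∈ f, ∃ v ∈ PySem.List.pyGetD g u [], v.toNat = j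
  · rw [hy1 (hCiff.mpr hC), hy2 hC]
  · rw [hn1 (fun h => hC (hCiff.mp h)), hn2 hC]

-- rounds beyond every occupied level are no-ops
theorem noopRounds (n : Int) (g : List (List Int)) (hn : 1 ≤ n) :
    ∀ (m : Nat) (d : Int) (dist : List Int), 0 ≤ d → d + m = n + 1 →
      dist.length = (n + 1).toNat →
      (∀ j : Nat, j < (n + 1).toNat → dist.getD j (-1) < d) →
      (PySem.List.pyRange d (n + 1) 1).foldl (roundB g n) dist = dist := by
  intro m
  induction m with
  | zero =>
    intro d dist hd0 hdm hdl _
    rw [PySem.List.pyRange_one_eq_nil (by omega)]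
    rfl
  | succ m ih =>
    intro d dist hd0 hdm hdl hlt
    rw [PySem.List.pyRange_one_cons (by omega), List.foldl_cons]
    have hstep : roundB g n dist d = dist := by
      have hus : ∀ u ∈ PySem.List.pyRange 0 (n + 1) 1, 0 ≤ u ∧ u < n + 1 := by
        intro u hu
        rw [PySem.List.mem_pyRange_one] at hu
        exact hu
      have hlevrow : ∀ u : Int, 0 ≤ u → u < n + 1 → dist.getD u.toNat (-1) = d →
          ∀ v ∈ PySem.List.pyGetD g u [], 0 ≤ v ∧ v < n + 1 := by
        intro u hu0 hu1 hud
        have := hlt u.toNat (by omega)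
        omega
      obtain ⟨hl1, hp1⟩ := roundChar n g hn d hd0 (PySem.List.pyRange 0 (n + 1) 1)
        dist hus hlevrow hdl
      show (PySem.List.pyRange 0 (n + 1) 1).foldl _ dist = _
      apply List.ext_getElem (by rw [hl1, hdl])
      intro j hj1 hj2
      have hjN : j < (n + 1).toNat := by rw [hl1] at hj1; exact hj1
      rw [← List.getD_eq_getElem _ (-1) hj1, ← List.getD_eq_getElem _ (-1) hj2]
      obtain ⟨-, hn1⟩ := hp1 j hjN
      apply hn1
      rintro ⟨-, u, hu, hud, -⟩
      have hub := hus u hu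
      have := hlt u.toNat (by omega)
      omega
    rw [hstep]
    exact ih (d + 1) dist (by omega) (by omega) hdl
      (fun j hj => by have := hlt j hj; omega)

-- the level BFS equals B's remaining rounds, given the level invariants
theorem linkLemma (n : Int) (g : List (List Int)) (hn : 1 ≤ n) (Hs : Int → Prop)
    (hSrow : ∀ u : Int, Hs u →
      ∀ v ∈ PySem.List.pyGetD g u [], (0 ≤ v ∧ v < n + 1) ∧ Hs v) :
    ∀ (m : Nat) (d : Int) (dist f : List Int), 0 ≤ d → d + m = n + 1 →
      dist.length = (n + 1).toNat →
      (∀ j : Nat, j < (n + 1).toNat →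
        dist.getD j (-1) = -1 ∨ (0 ≤ dist.getD j (-1) ∧ dist.getD j (-1) ≤ d)) →
      (∀ j : Nat, j < (n + 1).toNat → (dist.getD j (-1) = d ↔ ∃ u ∈ f, u.toNat = j)) →
      (∀ u ∈ f, (0 ≤ u ∧ u < n + 1) ∧ Hs u) →
      (f ≠ [] → d.toNat + cntNeg dist ≤ n.toNat) →
      bfsL g (m + 1) dist f = (PySem.List.pyRange d (n + 1) 1).foldl (roundB g n) dist := by
  intro m
  induction m with
  | zero =>
    intro d dist f hd0 hdm hdl hvals hset hf hcnt
    cases f with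
    | nil =>
      rw [bfsL_nil, PySem.List.pyRange_one_eq_nil (by omega)]
      rfl
    | cons u f' =>
      have := hcnt (by simp)
      omega
  | succ m ih =>
    intro d dist f hd0 hdm hdl hvals hset hf hcnt
    cases f with
    | nil =>
      rw [bfsL_nil]
      exact (noopRounds n g hn (m + 1) d dist hd0 (by omega) hdl
        (fun j hj => by
          have h1 := hvals j hj
          have h2 := hset j hj
          rcases h1 with h1 | h1
          · omega
          · rcases lt_or_eq_of_le h1.2 with h3 | h3
            · exact h3
            · exact absurd (h2.mp h3) (by simp))).symm
    | cons u f' =>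
      have hdn : d < n + 1 := by
        have := hcnt (by simp)
        omega
      rw [PySem.List.pyRange_one_cons (by omega), List.foldl_cons]
      have hfb : ∀ w ∈ u :: f', 0 ≤ w ∧ w < n + 1 := fun w hw => (hf w hw).1
      have hfrow : ∀ w ∈ u :: f', ∀ v ∈ PySem.List.pyGetD g w [], 0 ≤ v ∧ v < n + 1 :=
        fun w hw v hv => (hSrow w (hf w hw).2 v hv).1
      have hflev : ∀ w ∈ u :: f', dist.getD w.toNat (-1) = d := by
        intro w hw
        exact (hset w.toNat (by have := hfb w hw; omega)).mpr ⟨w, hw, rfl⟩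
      have hre := roundEq n g hn d hd0 (u :: f') dist hfrow hfb hdl hset
      rw [hre]
      obtain ⟨hl2, hp2, hm2⟩ := procChar n g hn d hd0 (u :: f') dist [] hfb hfrow hdl hflev
      have hdc : ∀ c ∈ dist, -1 ≤ c := by
        intro c hc
        obtain ⟨j, hj, hjc⟩ := List.mem_iff_getElem.mp hc
        have := hvals j (by omega)
        rw [List.getD_eq_getElem _ (-1) hj, hjc] at this
        omega
      obtain ⟨-, -, Δ', hΔ'eq, hΔ'mem, hΔ'cnt⟩ :=
        procInv n g hn Hs hSrow (u :: f') hf dist [] hdl hdc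
      simp only [List.nil_append] at hΔ'eq
      rw [bfsL_cons]
      set dist₁ := (procL g (u :: f') (dist, [])).1 with hdist₁
      set Δ := (procL g (u :: f') (dist, [])).2 with hΔ
      have hΔΔ'0 : Δ = Δ' := hΔ'eq
      have hΔb : ∀ x ∈ Δ, (0 ≤ x ∧ x < n + 1) ∧ Hs x := by
        intro x hx
        rw [hΔΔ'0] at hx
        exact hΔ'mem x hx
      have hvals₁ : ∀ j : Nat, j < (n + 1).toNat →
          dist₁.getD j (-1) = -1 ∨ (0 ≤ dist₁.getD j (-1) ∧ dist₁.getD j (-1) ≤ d + 1) := by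
        intro j hj
        obtain ⟨hy, hno⟩ := hp2 j hj
        by_cases hC : dist.getD j (-1) = -1 ∧ ∃ w ∈ u :: f',
            ∃ v ∈ PySem.List.pyGetD g w [], v.toNat = j
        · rw [hy hC]
          omega
        · rw [hno hC]
          have := hvals j hj
          omega
      have hset₁ : ∀ j : Nat, j < (n + 1).toNat →
          (dist₁.getD j (-1) = d + 1 ↔ ∃ x ∈ Δ, x.toNat = j) := by
        intro j hj
        obtain ⟨hy, hno⟩ := hp2 j hj
        constructor
        · intro h
          by_cases hC : dist.getD j (-1) = -1 ∧ ∃ w ∈ u :: f',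
              ∃ v ∈ PySem.List.pyGetD g w [], v.toNat = j
          · obtain ⟨h1, w, hw, v, hvr, hvj⟩ := hC
            refine ⟨v, ?_, hvj⟩
            rw [hm2 v]
            have hvb := hfrow w hw v hvr
            exact Or.inr ⟨hvb.1, hvb.2, by rw [hvj]; exact h1, w, hw, hvr⟩
          · rw [hno hC] at h
            have := hvals j hj
            omega
        · rintro ⟨x, hx, hxj⟩
          have := (hm2 x).mp hx
          simp only [List.not_mem_nil, false_or] at this
          obtain ⟨hx0, hx1, hxd, w, hw, hxr⟩ := this
          exact hy ⟨by rw [← hxj]; exact hxd, w, hw, x, hxr, hxj⟩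
      have hcnt₁ : Δ ≠ [] → (d + 1).toNat + cntNeg dist₁ ≤ n.toNat := by
        intro hne
        have h1 := hcnt (by simp)
        have hΔΔ' : Δ = Δ' := hΔ'eq
        have h2 : 0 < Δ.length := List.length_pos_of_ne_nil hne
        rw [hΔΔ'] at h2
        omega
      have hih := ih (d + 1) dist₁ Δ (by omega) (by omega) hl2 hvals₁ hset₁ hΔb hcnt₁
      exact hih

-- the two aggregations perform the same update sequence
theorem agg_eq (n : Int) (types dist md0 : List Int) (hn : 1 ≤ n)
    (htl : n.toNat ≤ types.length) (hdl : dist.length = (n + 1).toNat) :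
    (PySem.List.pyRange 1 (n + 1) 1).foldl
      (fun md i =>
        let t := PySem.List.pyGetD types (i - 1) 0
        PySem.List.pySetD md t (max (PySem.List.pyGetD md t (-1)) (PySem.List.pyGetD dist i (-1))))
      md0
    = (types.zip (PySem.List.slice dist (some 1) none)).foldl
        (fun md p => PySem.List.pySetD md p.1 (max (PySem.List.pyGetD md p.1 (-1)) p.2)) md0 := by
  have hzip : types.zip (PySem.List.slice dist (some 1) none)
      = (PySem.List.pyRange 1 (n + 1) 1).map
          (fun i => (PySem.List.pyGetD types (i - 1) 0, PySem.List.pyGetD dist i (-1))) := by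
    rw [PySem.List.slice_from_one]
    apply List.ext_getElem
    · simp [PySem.List.length_pyRange_one]
      omega
    · intro j hj1 hj2
      have hjn : j < n.toNat := by
        simp [PySem.List.length_pyRange_one] at hj2
        omega
      have hjt : j < types.length := by omega
      have hjd : j + 1 < dist.length := by omega
      rw [List.getElem_zip, List.getElem_map, PySem.List.getElem_pyRange_one]
      have e1 : PySem.List.pyGetD types ((1 : Int) + j - 1) 0 = types[j] := by
        rw [PySem.List.pyGetD_eq_getElem types 0 (by omega) (by omega)]
        congr 1
        omega
      have e2 : PySem.List.pyGetD dist ((1 : Int) + j) (-1) = dist[j + 1] := by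
        rw [PySem.List.pyGetD_eq_getElem dist (-1) (by omega) (by omega)]
        congr 1
        omega
      rw [e1, e2]
      simp [List.getElem_tail]
  rw [hzip, List.foldl_map]

-- ===== VERDICT (by name: the statement is the Claim_ definition above) =====
theorem solve_spec : Claim_equal_solve := by
  intro n g types k hdom hpre
  obtain ⟨hn, hg2, htl, htv, hshape⟩ := hpre
  show solve n g types k = solve_alt n g types k
  set dist0 := PySem.List.pySetD (List.replicate (n + 1).toNat (-1 : Int)) 1 0 with hdist0
  have hd0l : dist0.length = (n + 1).toNat := by
    rw [hdist0, PySem.List.length_pySetD, List.length_replicate]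
  have hd0set : dist0 = (List.replicate (n + 1).toNat (-1 : Int)).set 1 0 := by
    rw [hdist0, PySem.List.pySetD_of_nonneg _ _ (by norm_num)]
    norm_num
  have hd0c : ∀ c ∈ dist0, -1 ≤ c := by
    intro c hcm
    rw [hd0set] at hcm
    rcases List.mem_or_eq_of_mem_set hcm with h | h
    · rw [List.eq_of_mem_replicate h]
    · omega
  have hcnt0 : cntNeg dist0 + 1 = (n + 1).toNat := by
    have hstep : cntNeg ((List.replicate (n + 1).toNat (-1 : Int)).set 1 0) + 1
        = cntNeg (List.replicate (n + 1).toNat (-1 : Int)) := by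
      refine cntNeg_set _ 1 0 ?_ ?_ (by norm_num)
      · rw [List.length_replicate]; omega
      · simp
    have hrep : cntNeg (List.replicate (n + 1).toNat (-1 : Int)) = (n + 1).toNat := by
      simp [cntNeg, List.countP_replicate]
    rw [hd0set, hstep, hrep]
  have hd0get : ∀ j : Nat, j < (n + 1).toNat →
      dist0.getD j (-1) = if j = 1 then 0 else -1 := by
    intro j hj
    rw [hd0set, getD_set_int]
    simp only [List.length_replicate]
    by_cases hj1 : j = 1
    · simp [hj1]; omega
    · rw [if_neg (by omega), List.getD_eq_getElem _ _ (by simpa using hj)]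
      simp [hj1]
  -- BFS side: queue BFS = level BFS = round sweep (for any safe set containing 1)
  have hvals : ∀ j : Nat, j < (n + 1).toNat →
      dist0.getD j (-1) = -1 ∨ (0 ≤ dist0.getD j (-1) ∧ dist0.getD j (-1) ≤ 0) := by
    intro j hj
    rw [hd0get j hj]
    split_ifs <;> omega
  have hseteq : ∀ j : Nat, j < (n + 1).toNat →
      (dist0.getD j (-1) = 0 ↔ ∃ u ∈ ([1] : List Int), u.toNat = j) := by
    intro j hj
    rw [hd0get j hj]
    constructor
    · intro h
      by_cases h1 : j = 1
      · exact ⟨1, by simp, by omega⟩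
      · rw [if_neg h1] at h
        omega
    · rintro ⟨u, hu, hut⟩
      simp at hu
      subst hu
      rw [if_pos (show j = 1 by omega)]
  have hbfsS : ∀ (Hs : Int → Prop),
      (∀ u : Int, Hs u → ∀ v ∈ PySem.List.pyGetD g u [], (0 ≤ v ∧ v < n + 1) ∧ Hs v) →
      Hs 1 →
      bfsA g ((n + 1).toNat + 1) dist0 [1]
        = (PySem.List.pyRange 0 (n + 1) 1).foldl (roundB g n) dist0 := by
    intro Hs hSrow hHs1
    rw [mainEq n g hn Hs hSrow ((n + 1).toNat + 1) [1] dist0 ((n + 1).toNat + 1)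
      (by intro u hu; simp at hu; subst hu; exact ⟨⟨by omega, by omega⟩, hHs1⟩)
      hd0l hd0c (by simp; omega) (by omega)]
    exact linkLemma n g hn Hs hSrow (n + 1).toNat 0 dist0 [1] (by omega) (by omega)
      hd0l hvals hseteq
      (by intro u hu; simp at hu; subst hu; exact ⟨⟨by omega, by omega⟩, hHs1⟩)
      (by intro _; omega)
  have hbfs : bfsA g ((n + 1).toNat + 1) dist0 [1]
      = (PySem.List.pyRange 0 (n + 1) 1).foldl (roundB g n) dist0 := by
    rcases hshape with hone | ⟨hglen, hrows⟩
    · refine hbfsS (fun u => (0 ≤ u ∧ u < n + 1) ∧ (u = 1 ∨ u ∈ PySem.List.pyGetD g 1 []))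
        ?_ ⟨⟨by omega, by omega⟩, Or.inl rfl⟩
      intro u hu v hv
      have hrow1 : ∀ v ∈ PySem.List.pyGetD g 1 [],
          (0 ≤ v ∧ v < n + 1) ∧ ((0 ≤ v ∧ v < n + 1) ∧ (v = 1 ∨ v ∈ PySem.List.pyGetD g 1 [])) := by
        intro w hw
        have := hone w hw
        exact ⟨⟨this.1.1, by omega⟩, ⟨this.1.1, by omega⟩, Or.inr hw⟩
      rcases hu.2 with rfl | humem
      · exact hrow1 v hv
      · rcases (hone u humem).2.2 with rfl | hemp
        · exact hrow1 v hv
        · rw [hemp] at hv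
          exact absurd hv (List.not_mem_nil)
    · refine hbfsS (fun u => 0 ≤ u ∧ u < n + 1) ?_ ⟨by omega, by omega⟩
      intro u hu v hv
      have hu0 := hu.1
      have hu1 := hu.2
      have hul : u.toNat < g.length := by omega
      have hrow : PySem.List.pyGetD g u [] = g[u.toNat] := by
        exact PySem.List.pyGetD_eq_getElem g [] hu0 (by omega)
      have hmem : g[u.toNat] ∈ g.take (n + 1).toNat := by
        have : (g.take (n + 1).toNat)[u.toNat]'(by simp; omega) = g[u.toNat] :=
          List.getElem_take
        rw [← this]
        exact List.getElem_mem _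
      have := hrows _ hmem v (by rwa [hrow] at hv)
      exact ⟨⟨by omega, by omega⟩, by omega, by omega⟩
  have hlenA : ∀ (fuel : Nat) (dist f : List Int), (bfsA g fuel dist f).length = dist.length := by
    intro fuel
    induction fuel with
    | zero => intro dist f; rfl
    | succ fuel ihf =>
      intro dist f
      cases f with
      | nil => rfl
      | cons u rest =>
        rw [bfsA_cons, ihf]
        have : ∀ (es : List Int) (p : List Int × List Int),
            ((es.foldl (bodyA u) p).1).length = p.1.length := by
          intro es
          induction es with
          | nil => intro p; rfl
          | cons v es ihe =>
            intro p
            rw [List.foldl_cons, ihe]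
            by_cases hc : PySem.List.pyGetD p.1 v (-1) = -1
            · simp [bodyA, hc, PySem.List.length_pySetD]
            · simp [bodyA, hc]
        exact this _ _
  have hsolve : solve n g types k
      = PySem.List.slice
          ((PySem.List.pyRange 1 (n + 1) 1).foldl
            (fun md i =>
              let t := PySem.List.pyGetD types (i - 1) 0
              PySem.List.pySetD md t (max (PySem.List.pyGetD md t (-1))
                (PySem.List.pyGetD (bfsA g ((n + 1).toNat + 1) dist0 [1]) i (-1))))
            (List.replicate (k + 1).toNat (-1 : Int)))
          (some 1) none := rfl
  have hsolve_alt : solve_alt n g types k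
      = PySem.List.slice
          ((types.zip (PySem.List.slice
              ((PySem.List.pyRange 0 (n + 1) 1).foldl (roundB g n) dist0) (some 1) none)).foldl
            (fun md p => PySem.List.pySetD md p.1 (max (PySem.List.pyGetD md p.1 (-1)) p.2))
            (List.replicate (k + 1).toNat (-1 : Int)))
          (some 1) none := rfl
  rw [hsolve, hsolve_alt, ← hbfs]
  rw [agg_eq n types (bfsA g ((n + 1).toNat + 1) dist0 [1])
    (List.replicate (k + 1).toNat (-1 : Int)) hn htl (by rw [hlenA]; exact hd0l)]
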